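-- pv_equiv track=rewrite | github.com/zrun0/zrun-backend | shared/zrun-core/src/zrun_core/auth.py | _extract_token_from_metadata
-- ===== SOURCE A (Python) =====
-- from typing import TYPE_CHECKING, Any, cast
--
-- def _decode_metadata_value(value: bytes | str) -> str:
--     """Decode metadata value to string.
--
--     Args:
--         value: Metadata value (bytes or str).
--
--     Returns:
--         Decoded string value.
--     """
--     if isinstance(value, bytes):
--         return value.decode("utf-8")
--     return value
--
-- def _decode_metadata_key(key: bytes | str) -> str:
--     """Decode metadata key to string.
--
--     Args:
--         key: Metadata key (bytes or str).
--
--     Returns: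
--         Decoded string key.
--     """
--     if isinstance(key, bytes):
--         return key.decode("utf-8")
--     return key
--
-- def _extract_token_from_metadata(
--
--     metadata: Any,
-- ) -> str | None:
--     """Extract JWT token from metadata.
--
--     Args:
--         metadata: Invocation metadata from gRPC.
--
--     Returns:
--         JWT token string or None if not found.
--     """
--     if metadata is None:
--         return None
--
--     # Cast to iterable type after None check
--     metadata_iter = cast("Iterable[tuple[bytes | str, bytes | str]]", metadata)
--
--     # Convert Metadata to dict, handling bytes keys/values
--     metadata_dict = {
--         _decode_metadata_key(k): _decode_metadata_value(v)
--         for k, v in metadata_iter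
--     }
--
--     # Try Authorization header first (case-insensitive)
--     for key, value in metadata_dict.items():
--         if key.lower() == "authorization" and value.startswith("Bearer "):
--             return value[7:]
--
--     # Try custom token header (case-insensitive)
--     for key, value in metadata_dict.items():
--         if key.lower() == "token":
--             return value
--
--     return None
-- ===== SOURCE B (Python) =====
-- def _decode_metadata_value(value):
--     if isinstance(value, bytes):
--         return value.decode("utf-8")
--     return value
--
--
-- def _decode_metadata_key(key):
--     if isinstance(key, bytes):
--         return key.decode("utf-8")
--     return key
--
--
-- def _extract_token_from_metadata(metadata):
--     """Extract JWT token from metadata by candidate scoring: every header that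
--     could supply a token is turned into a (priority, position, token) candidate
--     (Bearer Authorization = priority 0, token header = priority 1), and the
--     winner is the global minimum under the (priority, position) key."""
--     if metadata is None:
--         return None
--
--     metadata_dict = {
--         _decode_metadata_key(k): _decode_metadata_value(v)
--         for k, v in metadata
--     }
--
--     candidates = []
--     for i, (key, value) in enumerate(metadata_dict.items()):
--         kl = key.lower()
--         if kl == "authorization" and value.startswith("Bearer "):
--             candidates.append((0, i, value[7:]))
--         elif kl == "token":
--             candidates.append((1, i, value))
--
--     best = min(candidates, key=lambda c: (c[0], c[1]), default=None)
--     return None if best is None else best[2]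
-- ===== Notes on version B (the rewrite author's own statement) =====
-- stated objective: alternative
-- what changed: Instead of A's two staged first-match scans over the decoded dict, B scores every eligible header into a (priority, position, token) candidate in one pass and returns the token of the global minimum candidate under the (priority, position) key.
import Mathlib
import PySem

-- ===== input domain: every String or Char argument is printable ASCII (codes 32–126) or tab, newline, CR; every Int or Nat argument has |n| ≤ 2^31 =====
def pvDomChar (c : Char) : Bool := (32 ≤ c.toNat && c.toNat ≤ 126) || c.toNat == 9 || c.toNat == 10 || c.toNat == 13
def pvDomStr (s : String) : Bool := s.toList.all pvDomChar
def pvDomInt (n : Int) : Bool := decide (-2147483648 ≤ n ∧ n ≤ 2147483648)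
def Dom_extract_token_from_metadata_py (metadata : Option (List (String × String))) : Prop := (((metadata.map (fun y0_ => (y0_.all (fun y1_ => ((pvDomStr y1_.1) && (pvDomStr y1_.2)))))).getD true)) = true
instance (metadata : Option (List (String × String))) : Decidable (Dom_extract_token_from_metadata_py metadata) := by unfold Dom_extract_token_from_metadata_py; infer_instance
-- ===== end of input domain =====

-- B replaces A's two staged first-match scans by candidate scoring: each eligible header
-- becomes a (priority, position, token) candidate and the global (priority, position)-minimum wins
-- (alternative decomposition, same cost).

-- ===== PORT A =====
-- first loop of A: return value[7:] at the first case-insensitive Authorization header with a "Bearer " value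
def pvLoopAuth : List (String × String) → Option String
  | [] => none
  | (k, v) :: rest =>
    if PySem.Str.lower k == "authorization" && PySem.Str.startswith v "Bearer " then
      some (PySem.Str.slice v (some 7) none)
    else pvLoopAuth rest

-- second loop of A: return the value at the first case-insensitive token header
def pvLoopTok : List (String × String) → Option String
  | [] => none
  | (k, v) :: rest =>
    if PySem.Str.lower k == "token" then some v else pvLoopTok rest

def extract_token_from_metadata_py (metadata : Option (List (String × String))) : Option String :=
  match metadata with
  | none => none
  | some md =>
    -- dict comprehension (keys/values already str in this port's type)
    let metadata_dict : PySem.Dict String String :=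
      md.foldl (fun d p => d.insert p.1 p.2) PySem.Dict.empty
    match pvLoopAuth metadata_dict.items with
    | some v => some v
    | none => pvLoopTok metadata_dict.items

-- ===== PORT B =====
-- loop body of Source B: append the candidate triple for one enumerated (key, value) pair
def pvCandStep (acc : List (Int × Int × String)) (p : Int × (String × String)) :
    List (Int × Int × String) :=
  let kl := PySem.Str.lower p.2.1
  if kl == "authorization" && PySem.Str.startswith p.2.2 "Bearer " then
    acc ++ [(0, p.1, PySem.Str.slice p.2.2 (some 7) none)]
  else if kl == "token" then
    acc ++ [(1, p.1, p.2.2)]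
  else acc

def extract_token_from_metadata_py_alt (metadata : Option (List (String × String))) : Option String :=
  match metadata with
  | none => none
  | some md =>
    let metadata_dict : PySem.Dict String String :=
      md.foldl (fun d p => d.insert p.1 p.2) PySem.Dict.empty
    let candidates :=
      (PySem.List.enumerate metadata_dict.items 0).foldl pvCandStep []
    -- min(candidates, key=lambda c: (c[0], c[1]), default=None)
    match PySem.List.min2? candidates (fun c => c.1) (fun c => c.2.1) with
    | none => none
    | some best => some best.2.2

-- ===== PRECONDITION & SPEC =====
def Spec_extract_token_from_metadata_py (metadata : Option (List (String × String))) (out : Option String) : Prop := out = extract_token_from_metadata_py_alt metadata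
instance (metadata : Option (List (String × String))) (out : Option String) : Decidable (Spec_extract_token_from_metadata_py metadata out) := by unfold Spec_extract_token_from_metadata_py; infer_instance

-- ===== CLAIM =====
def Claim_equal_extract_token_from_metadata_py : Prop := ∀ (metadata : Option (List (String × String))), Dom_extract_token_from_metadata_py metadata → Spec_extract_token_from_metadata_py metadata (extract_token_from_metadata_py metadata)

-- ===== LEMMAS AND PROOFS =====

-- the candidate list of Source B's loop, written as structural recursion with explicit start index
def pvCand (i : Int) : List (String × String) → List (Int × Int × String)
  | [] => []
  | (k, v) :: rest =>
    if PySem.Str.lower k == "authorization" && PySem.Str.startswith v "Bearer " then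
      (0, i, PySem.Str.slice v (some 7) none) :: pvCand (i + 1) rest
    else if PySem.Str.lower k == "token" then
      (1, i, v) :: pvCand (i + 1) rest
    else pvCand (i + 1) rest

-- the accumulator step of PySem.List.min2? for our keys, named so lemmas can speak about it
def pvMStep (acc : Option (Int × Int × String)) (x : Int × Int × String) :
    Option (Int × Int × String) :=
  match acc with
  | none => some x
  | some m =>
    if (decide (x.1 < m.1) || (!decide (m.1 < x.1) && decide (x.2.1 < m.2.1))) = true then some x
    else some m

theorem pvMin2_eq (cs : List (Int × Int × String)) :
    PySem.List.min2? cs (fun c => c.1) (fun c => c.2.1) = cs.foldl pvMStep none := by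
  simp only [PySem.List.min2?]
  congr 1
  funext acc x
  cases acc <;> rfl

theorem pvCandFold (l : List (String × String)) :
    ∀ (acc : List (Int × Int × String)) (i : Int),
      (PySem.List.enumerate l i).foldl pvCandStep acc = acc ++ pvCand i l := by
  induction l with
  | nil => intro acc i; simp [PySem.List.enumerate_nil, pvCand]
  | cons p rest ih =>
    intro acc i
    obtain ⟨k, v⟩ := p
    rw [PySem.List.enumerate_cons]
    simp only [List.foldl_cons, pvCandStep, pvCand]
    split_ifs <;> simp_all

-- once a priority-0 candidate from an earlier position is held, no later candidate replaces it
theorem pvStay (l : List (String × String)) :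
    ∀ (i : Int) (m : Int × Int × String), m.1 = 0 → m.2.1 < i →
      (pvCand i l).foldl pvMStep (some m) = some m := by
  induction l with
  | nil => intro i m _ _; simp [pvCand]
  | cons p rest ih =>
    intro i m h0 hlt
    obtain ⟨k, v⟩ := p
    simp only [pvCand]
    split_ifs with hA hT
    · rw [List.foldl_cons]
      have hstep : pvMStep (some m) (0, i, PySem.Str.slice v (some 7) none) = some m := by
        simp only [pvMStep, h0]
        rw [if_neg]
        simp only [decide_eq_true_eq, Bool.or_eq_true, Bool.and_eq_true, Bool.not_eq_true',
          decide_eq_false_iff_not]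
        omega
      rw [hstep]
      exact ih (i + 1) m h0 (by omega)
    · rw [List.foldl_cons]
      have hstep : pvMStep (some m) (1, i, v) = some m := by
        simp only [pvMStep, h0]
        rw [if_neg]
        simp only [decide_eq_true_eq, Bool.or_eq_true, Bool.and_eq_true, Bool.not_eq_true',
          decide_eq_false_iff_not]
        omega
      rw [hstep]
      exact ih (i + 1) m h0 (by omega)
    · exact ih (i + 1) m h0 (by omega)

-- holding a priority-1 candidate, the fold yields the first later priority-0 candidate, else keeps it
theorem pvFromTok (l : List (String × String)) :
    ∀ (i : Int) (m : Int × Int × String), m.1 = 1 → m.2.1 < i →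
      ((pvCand i l).foldl pvMStep (some m)).map (fun c => c.2.2)
        = some ((pvLoopAuth l).getD m.2.2) := by
  induction l with
  | nil => intro i m _ _; simp [pvCand, pvLoopAuth]
  | cons p rest ih =>
    intro i m h1 hlt
    obtain ⟨k, v⟩ := p
    simp only [pvCand, pvLoopAuth]
    split_ifs with hA hT
    · rw [List.foldl_cons]
      have hstep : pvMStep (some m) (0, i, PySem.Str.slice v (some 7) none)
          = some (0, i, PySem.Str.slice v (some 7) none) := by
        simp [pvMStep, h1]
      rw [hstep, pvStay rest (i + 1) _ rfl (show i < i + 1 by omega)]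
      simp
    · rw [List.foldl_cons]
      have hstep : pvMStep (some m) (1, i, v) = some m := by
        simp only [pvMStep, h1]
        rw [if_neg]
        simp only [decide_eq_true_eq, Bool.or_eq_true, Bool.and_eq_true, Bool.not_eq_true',
          decide_eq_false_iff_not]
        omega
      rw [hstep]
      exact ih (i + 1) m h1 (by omega)
    · exact ih (i + 1) m h1 (by omega)

-- the whole selection: min over the scored candidates = first Bearer auth, else first token
theorem pvMain (l : List (String × String)) :
    ∀ (i : Int),
      ((pvCand i l).foldl pvMStep none).map (fun c => c.2.2)
        = (pvLoopAuth l).or (pvLoopTok l) := by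
  induction l with
  | nil => intro i; simp [pvCand, pvLoopAuth, pvLoopTok]
  | cons p rest ih =>
    intro i
    obtain ⟨k, v⟩ := p
    simp only [pvCand, pvLoopAuth, pvLoopTok]
    split_ifs with hA hT hT'
    · -- Bearer auth header that split_ifs also takes for a token header (vacuous combination)
      rw [List.foldl_cons,
        show pvMStep none (0, i, PySem.Str.slice v (some 7) none)
          = some (0, i, PySem.Str.slice v (some 7) none) from rfl,
        pvStay rest (i + 1) _ rfl (show i < i + 1 by omega)]
      simp
    · rw [List.foldl_cons,
        show pvMStep none (0, i, PySem.Str.slice v (some 7) none)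
          = some (0, i, PySem.Str.slice v (some 7) none) from rfl,
        pvStay rest (i + 1) _ rfl (show i < i + 1 by omega)]
      simp
    · rw [List.foldl_cons,
        show pvMStep none (1, i, v) = some (1, i, v) from rfl,
        pvFromTok rest (i + 1) _ rfl (show i < i + 1 by omega)]
      cases h : pvLoopAuth rest <;> simp [Option.or]
    · exact ih (i + 1)

-- ===== VERDICT =====
theorem extract_token_from_metadata_py_spec : Claim_equal_extract_token_from_metadata_py := by
  intro metadata _
  unfold Spec_extract_token_from_metadata_py extract_token_from_metadata_py extract_token_from_metadata_py_alt
  cases metadata with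
  | none => rfl
  | some md =>
    simp only [pvMin2_eq, pvCandFold _ [] 0, List.nil_append]
    have h := pvMain (md.foldl (fun d p => d.insert p.1 p.2) PySem.Dict.empty).items 0
    cases hm : (pvCand 0 (md.foldl (fun d p => d.insert p.1 p.2) PySem.Dict.empty).items).foldl pvMStep none with
    | none =>
      rw [hm] at h
      simp only [Option.map_none] at h
      cases hA : pvLoopAuth (md.foldl (fun d p => d.insert p.1 p.2) PySem.Dict.empty).items <;>
        simp_all [Option.or]
    | some c =>
      rw [hm] at h
      simp only [Option.map_some] at h
      cases hA : pvLoopAuth (md.foldl (fun d p => d.insert p.1 p.2) PySem.Dict.empty).items <;>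
        simp_all [Option.or]
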